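-- pv_equiv track=rewrite | github.com/kayo5000/Prosodic | data_generator.py | _build_nucleus_index
-- ===== SOURCE A (Python) =====
-- from collections import defaultdict
-- from typing import Dict, List, Optional, Tuple
--
-- def _vowel_nucleus(rhyme_unit: Tuple[str, ...]) -> str:
--     """Extract just the vowel from a rhyme unit (first element if it's a vowel)."""
--     if rhyme_unit and rhyme_unit[0][-1].isdigit():
--         # Strip stress digit for nucleus comparison (AH1 → AH, ER0 → ER)
--         return rhyme_unit[0][:-1]
--     return ""
--
-- def _build_nucleus_index(
--     rhyme_index: Dict[Tuple, List[str]]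
-- ) -> Dict[str, List[Tuple]]:
--     """
--     Build a nucleus index: vowel_nucleus → [rhyme_units with that nucleus].
--
--     Used to find slant rhyme candidates: same vowel, different coda.
--     """
--     nucleus_idx: Dict[str, List[Tuple]] = defaultdict(list)
--     for ru in rhyme_index:
--         nucleus = _vowel_nucleus(ru)
--         if nucleus:
--             nucleus_idx[nucleus].append(ru)
--     return {n: units for n, units in nucleus_idx.items() if len(units) >= 2}
-- ===== SOURCE B (Python) =====
-- def _build_nucleus_index(rhyme_index):
--     # Flat two-level scan, no grouping dict: precompute the nucleus of every unit,
--     # then at the FIRST occurrence of each nonempty nucleus gather its whole group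
--     # by one comprehension over the zipped (unit, nucleus) sequence.
--     units = list(rhyme_index)
--     nuclei = [ru[0][:-1] if ru and ru[0][-1].isdigit() else "" for ru in units]
--     pairs = []
--     for i, n in enumerate(nuclei):
--         if n and n not in nuclei[:i]:
--             group = [u for u, m in zip(units, nuclei) if m == n]
--             if len(group) >= 2:
--                 pairs.append((n, group))
--     return dict(pairs)
-- ===== Notes on version B (the rewrite author's own statement) =====
-- stated objective: alternative
-- what changed: A incrementally grows a defaultdict of per-nucleus lists in one pass and then filters the finished dict; B maintains no grouping structure at all: it precomputes the nucleus list, and at the first occurrence of each nonempty nucleus gathers that nucleus's whole group with a fresh scan over the zipped (unit, nucleus) sequence, keeping it if it has >= 2 members.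
import Mathlib
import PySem

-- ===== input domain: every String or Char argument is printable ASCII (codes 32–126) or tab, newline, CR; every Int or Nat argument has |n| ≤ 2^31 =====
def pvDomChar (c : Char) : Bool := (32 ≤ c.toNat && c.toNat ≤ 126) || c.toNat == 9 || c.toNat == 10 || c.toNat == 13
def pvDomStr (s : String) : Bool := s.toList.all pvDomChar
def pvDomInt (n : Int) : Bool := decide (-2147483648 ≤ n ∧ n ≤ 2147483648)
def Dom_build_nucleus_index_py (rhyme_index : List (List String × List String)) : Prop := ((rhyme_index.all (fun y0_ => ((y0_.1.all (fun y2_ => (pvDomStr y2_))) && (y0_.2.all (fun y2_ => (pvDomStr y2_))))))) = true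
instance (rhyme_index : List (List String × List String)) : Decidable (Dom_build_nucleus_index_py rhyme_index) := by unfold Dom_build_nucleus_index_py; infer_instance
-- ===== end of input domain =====

-- B replaces A's incremental dict-of-lists grouping by a flat two-level scan with no
-- grouping structure at all: it precomputes the nucleus of every unit, then at the first
-- occurrence of each nonempty nucleus gathers that nucleus's whole group in one
-- comprehension and keeps it if it has ≥ 2 members; equal return value wherever A returns
-- (Pre_ excludes only inputs where A raises IndexError).

-- ===== PORT A =====
-- _vowel_nucleus; 'rhyme_unit[0][-1]' is PySem.Str.pyGet? …; the 'none' case is Python's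
-- IndexError, excluded by Pre_.  (B's python inlines the identical expression, so its port
-- uses the same helper.)
def pvNucleus (ru : List String) : String :=
  match ru with
  | [] => ""
  | s :: _ =>
    match PySem.Str.pyGet? s (-1) with
    | none => ""   -- Python raises IndexError here (ru[0] = ""); Pre_ excludes these inputs
    | some c => if PySem.Chars.isdigit c then PySem.Str.slice s none (some (-1)) else ""

def build_nucleus_index_py (rhyme_index : List (List String × List String)) : List (String × List (List String)) :=
  let nucleus_idx : PySem.Dict String (List (List String)) :=
    rhyme_index.foldl (fun d item =>
      let nucleus := pvNucleus item.1
      if nucleus ≠ "" then d.modify nucleus [] (fun units => units ++ [item.1]) else d)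
      PySem.Dict.empty
  nucleus_idx.items.filter (fun p => decide (2 ≤ p.2.length))

-- ===== PORT B =====
def build_nucleus_index_py_alt (rhyme_index : List (List String × List String)) : List (String × List (List String)) :=
  let units := rhyme_index.map (fun p => p.1)
  let nuclei := units.map pvNucleus
  let pairs := (PySem.List.enumerate nuclei 0).foldl (fun pairs p =>
      if p.2 ≠ "" ∧ p.2 ∉ PySem.List.slice nuclei none (some p.1) then
        let group := ((units.zip nuclei).filter (fun q => q.2 == p.2)).map (fun q => q.1)
        if 2 ≤ group.length then pairs ++ [(p.2, group)] else pairs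
      else pairs) []
  -- dict(pairs): insert each pair in order
  (pairs.foldl (fun d p => d.insert p.1 p.2) PySem.Dict.empty).items

-- ===== PRECONDITION & SPEC =====
-- Pre_ excludes exactly the inputs on which A raises IndexError ('rhyme_unit[0][-1]' when a
-- nonempty key's first element is the empty string); B raises there too.
def Pre_build_nucleus_index_py (rhyme_index : List (List String × List String)) : Prop :=
  ∀ p ∈ rhyme_index, p.1.head? ≠ some ""
instance (rhyme_index : List (List String × List String)) : Decidable (Pre_build_nucleus_index_py rhyme_index) := by unfold Pre_build_nucleus_index_py; infer_instance

def pvWitness_build_nucleus_index_py : (List (List String × List String)) :=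
  [(["AH1", "T"], ["cat"]), (["AH0"], ["uh"]), (["K", "AH1"], ["x"])]

def Spec_build_nucleus_index_py (rhyme_index : List (List String × List String)) (out : List (String × List (List String))) : Prop := out = build_nucleus_index_py_alt rhyme_index
instance (rhyme_index : List (List String × List String)) (out : List (String × List (List String))) : Decidable (Spec_build_nucleus_index_py rhyme_index out) := by unfold Spec_build_nucleus_index_py; infer_instance

-- ===== CLAIM (what is proved, stated in full; the proofs are below) =====
def Claim_equal_build_nucleus_index_py : Prop := ∀ (rhyme_index : List (List String × List String)), Dom_build_nucleus_index_py rhyme_index → Pre_build_nucleus_index_py rhyme_index → Spec_build_nucleus_index_py rhyme_index (build_nucleus_index_py rhyme_index)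

-- ===== LEMMAS AND PROOFS =====

-- the (nucleus, key) pairs with nonempty nucleus, in order
def pvPairs (rhyme_index : List (List String × List String)) : List (String × List String) :=
  (rhyme_index.map (fun it => (pvNucleus it.1, it.1))).filter (fun p => decide (p.1 ≠ ""))

-- A's grouping dict, as a fold over pvPairs
lemma pv_groupA_eq (ri : List (List String × List String)) :
    ri.foldl (fun d item =>
        if pvNucleus item.1 ≠ "" then d.modify (pvNucleus item.1) [] (fun units => units ++ [item.1]) else d)
      PySem.Dict.empty
    = (pvPairs ri).foldl (fun d p => d.modify p.1 [] (fun units => units ++ [p.2])) PySem.Dict.empty := by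
  have h := PySem.List.foldl_ite_eq_foldl_filter (fun p : String × List String => p.1 ≠ "")
    (fun (d : PySem.Dict String (List (List String))) p => d.modify p.1 [] (fun units => units ++ [p.2]))
    (ri.map fun it => (pvNucleus it.1, it.1)) PySem.Dict.empty
  rw [pvPairs, ← h, List.foldl_map]

lemma pv_zip_self_map {α β : Type} (l : List α) (f : α → β) :
    l.zip (l.map f) = l.map (fun a => (a, f a)) := by
  induction l with
  | nil => rfl
  | cons a l ih => simpa [List.zip] using ih

-- both per-nucleus groups equal the plain filter of the units
lemma pv_group_eq (units : List (List String)) (k : String) (hk : k ≠ "") :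
    (((units.map (fun u => (pvNucleus u, u))).filter (fun p => decide (p.1 ≠ ""))).filter
        (fun p => p.1 == k)).map (fun p => p.2)
    = units.filter (fun u => pvNucleus u == k) := by
  rw [List.filter_filter]
  have hcg : ∀ p ∈ units.map (fun u => (pvNucleus u, u)),
      ((p.1 == k) && decide (p.1 ≠ "")) = (p.1 == k) := by
    intro p _
    by_cases h : p.1 = k
    · simp [h, hk]
    · simp [h]
  rw [List.filter_congr hcg, List.filter_map, List.map_map]
  have h1 : ((fun p : String × List String => p.1 == k) ∘ fun u => (pvNucleus u, u))
      = fun u => pvNucleus u == k := rfl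
  have h2 : ((fun p : String × List String => p.2) ∘ fun u => (pvNucleus u, u))
      = fun u => u := rfl
  rw [h1, h2]
  simp

lemma pv_groupB_eq (units : List (List String)) (k : String) :
    (((units.zip (units.map pvNucleus)).filter (fun q => q.2 == k)).map (fun q => q.1))
    = units.filter (fun u => pvNucleus u == k) := by
  rw [pv_zip_self_map, List.filter_map, List.map_map]
  have h1 : ((fun q : List String × String => q.2 == k) ∘ fun u => (u, pvNucleus u))
      = fun u => pvNucleus u == k := rfl
  have h2 : ((fun q : List String × String => q.1) ∘ fun u => (u, pvNucleus u))
      = fun u => u := rfl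
  rw [h1, h2]
  simp

-- first-occurrence scan over enumerate = flatMap over the deduplicated nonempty elements
lemma pv_firstocc {β : Type} (ns : List String) (f : String → List β) (acc : List β) :
    (PySem.List.enumerate ns 0).foldl (fun a p =>
        if p.2 ≠ "" ∧ p.2 ∉ PySem.List.slice ns none (some p.1) then a ++ f p.2 else a) acc
    = acc ++ (PySem.Set.ofList (ns.filter (fun x => decide (x ≠ "")))).flatMap f := by
  induction ns using List.reverseRecOn generalizing acc with
  | nil => simp [PySem.List.enumerate_nil]
  | append_singleton ns x ih =>
    rw [PySem.List.enumerate_append, List.foldl_append]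
    have hpre : (PySem.List.enumerate ns 0).foldl (fun a p =>
          if p.2 ≠ "" ∧ p.2 ∉ PySem.List.slice (ns ++ [x]) none (some p.1) then a ++ f p.2 else a) acc
        = (PySem.List.enumerate ns 0).foldl (fun a p =>
          if p.2 ≠ "" ∧ p.2 ∉ PySem.List.slice ns none (some p.1) then a ++ f p.2 else a) acc := by
      apply PySem.List.foldl_congr_mem
      intro a p hp
      rcases (PySem.List.mem_enumerate_iff _ _ _).mp hp with ⟨k, hk, rfl⟩
      have h1 : ((0 : Int) + (k : Int)) = ((k : Nat) : Int) := by omega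
      rw [h1, PySem.List.slice_to_natCast, PySem.List.slice_to_natCast,
        List.take_append_of_le_length (le_of_lt hk)]
    rw [hpre, ih]
    have hlast : PySem.List.slice (ns ++ [x]) none (some ((0 : Int) + (ns.length : Int)))
        = ns := by
      have h1 : ((0 : Int) + (ns.length : Int)) = ((ns.length : Nat) : Int) := by omega
      rw [h1, PySem.List.slice_to_natCast, List.take_left]
    simp only [PySem.List.enumerate_cons, PySem.List.enumerate_nil, List.foldl_cons, List.foldl_nil, hlast]
    rw [List.filter_append]
    by_cases hx : x = ""
    · simp [hx]
    · have hfx : List.filter (fun x => decide (x ≠ "")) [x] = [x] := by simp [hx]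
      rw [hfx, PySem.Set.ofList_append_singleton, PySem.Set.add_eq_ite]
      by_cases hmem : x ∈ ns
      · have : x ∈ PySem.Set.ofList (ns.filter (fun x => decide (x ≠ ""))) :=
          (PySem.Set.mem_ofList _ _).mpr (List.mem_filter.mpr ⟨hmem, by simp [hx]⟩)
        simp [hx, hmem]
      · have : x ∉ PySem.Set.ofList (ns.filter (fun x => decide (x ≠ ""))) := by
          intro h
          exact hmem (List.mem_filter.mp ((PySem.Set.mem_ofList _ _).mp h)).1
        simp [hx, hmem, List.flatMap_append, List.append_assoc]

-- map-then-filter = flatMap with a guard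
lemma pv_filter_map_eq_flatMap {κ : Type} (S : List κ) (g : κ → List (List String)) :
    ((S.map (fun k => (k, g k))).filter (fun e => decide (2 ≤ e.2.length)))
    = S.flatMap (fun k => if 2 ≤ (g k).length then [(k, g k)] else []) := by
  induction S with
  | nil => rfl
  | cons k S ih =>
    simp only [List.map_cons, List.filter_cons, List.flatMap_cons, ← ih]
    by_cases h : 2 ≤ (g k).length
    · simp [h]
    · simp [h]

lemma pv_flatMap_guard_map_fst {κ : Type} (S : List κ) (g : κ → List (List String)) :
    (S.flatMap (fun k => if 2 ≤ (g k).length then [(k, g k)] else [])).map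
        (fun p : κ × List (List String) => p.1)
    = S.filter (fun k => decide (2 ≤ (g k).length)) := by
  induction S with
  | nil => rfl
  | cons k S ih =>
    simp only [List.flatMap_cons, List.map_append, ih, List.filter_cons]
    by_cases h : 2 ≤ (g k).length
    · simp [h]
    · simp [h]

-- ===== VERDICT (by name: the statement is the Claim_ definition above) =====
theorem build_nucleus_index_py_spec : Claim_equal_build_nucleus_index_py := by
  intro ri _ _
  unfold Spec_build_nucleus_index_py build_nucleus_index_py build_nucleus_index_py_alt
  show ((ri.foldl (fun d item =>
        if pvNucleus item.1 ≠ "" then d.modify (pvNucleus item.1) [] (fun units => units ++ [item.1]) else d)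
      PySem.Dict.empty).items).filter (fun p => decide (2 ≤ p.2.length))
    = (((PySem.List.enumerate ((ri.map (fun p => p.1)).map pvNucleus)).foldl (fun pairs p =>
        if p.2 ≠ "" ∧ p.2 ∉ PySem.List.slice ((ri.map (fun p => p.1)).map pvNucleus) none (some p.1) then
          let group := (((ri.map (fun p => p.1)).zip ((ri.map (fun p => p.1)).map pvNucleus)).filter
              (fun q => q.2 == p.2)).map (fun q => q.1)
          if 2 ≤ group.length then pairs ++ [(p.2, group)] else pairs
        else pairs) []).foldl (fun d p => d.insert p.1 p.2) PySem.Dict.empty).items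
  set units := ri.map (fun p => p.1) with hunits
  set nuclei := units.map pvNucleus with hnuclei
  set K := nuclei.filter (fun x => decide (x ≠ "")) with hK
  set grp := fun k => units.filter (fun u => pvNucleus u == k) with hgrp
  -- ---- A side ----
  have hLmap : (pvPairs ri) = (units.map (fun u => (pvNucleus u, u))).filter (fun p => decide (p.1 ≠ "")) := by
    rw [pvPairs, hunits, List.map_map]
    rfl
  have hKeq : (pvPairs ri).map (fun p => p.1) = K := by
    rw [hLmap, hK, hnuclei]
    simp only [List.filter_map, List.map_map]
    rfl
  have hnd := PySem.Dict.nodup_keys_foldl_modify_key (pvPairs ri) (fun p => p.1) []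
    (fun d p u => u ++ [p.2]) PySem.Dict.empty (by simp [PySem.Dict.keys_empty])
  have hA : (ri.foldl (fun d item =>
        if pvNucleus item.1 ≠ "" then d.modify (pvNucleus item.1) [] (fun units => units ++ [item.1]) else d)
      PySem.Dict.empty).items.filter (fun p => decide (2 ≤ p.2.length))
      = ((PySem.Set.ofList K).map (fun k => (k, grp k))).filter (fun e => decide (2 ≤ e.2.length)) := by
    rw [pv_groupA_eq, PySem.Dict.items_eq_map_keys _ hnd [],
      PySem.Dict.keys_foldl_modify_key, PySem.Dict.keys_empty, PySem.Set.update_nil_left, hKeq]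
    congr 1
    apply List.map_congr_left
    intro k hk
    have hkne : k ≠ "" := by
      have h1 := (PySem.Set.mem_ofList _ _).mp hk
      have h2 := List.mem_filter.mp (hK ▸ h1)
      simpa using h2.2
    rw [PySem.Dict.getD_foldl_modify_append, PySem.Dict.getD_empty, List.nil_append,
      hLmap]
    rw [pv_group_eq units k hkne, hgrp]
  rw [hA]
  -- ---- B side ----
  have hBbody : (fun (pairs : List (String × List (List String))) (p : Int × String) =>
        if p.2 ≠ "" ∧ p.2 ∉ PySem.List.slice nuclei none (some p.1) then
          let group := ((units.zip nuclei).filter (fun q => q.2 == p.2)).map (fun q => q.1)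
          if 2 ≤ group.length then pairs ++ [(p.2, group)] else pairs
        else pairs)
      = (fun pairs p =>
        if p.2 ≠ "" ∧ p.2 ∉ PySem.List.slice nuclei none (some p.1) then
          pairs ++ (if 2 ≤ (grp p.2).length then [(p.2, grp p.2)] else []) else pairs) := by
    funext pairs p
    have hg : ((units.zip nuclei).filter (fun q => q.2 == p.2)).map (fun q => q.1) = grp p.2 := by
      rw [hnuclei, pv_groupB_eq, hgrp]
    rw [show (if p.2 ≠ "" ∧ p.2 ∉ PySem.List.slice nuclei none (some p.1) then
          let group := ((units.zip nuclei).filter (fun q => q.2 == p.2)).map (fun q => q.1)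
          if 2 ≤ group.length then pairs ++ [(p.2, group)] else pairs
        else pairs)
      = (if p.2 ≠ "" ∧ p.2 ∉ PySem.List.slice nuclei none (some p.1) then
          if 2 ≤ (grp p.2).length then pairs ++ [(p.2, grp p.2)] else pairs
        else pairs) by rw [← hg]]
    split_ifs <;> simp
  rw [hBbody, pv_firstocc nuclei (fun n => if 2 ≤ (grp n).length then [(n, grp n)] else []) [],
    List.nil_append, ← hK]
  -- now both sides over ofList K; turn A's filter∘map into the same flatMap
  rw [pv_filter_map_eq_flatMap]
  -- dict(pairs).items = pairs since the keys are distinct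
  set pairs := (PySem.Set.ofList K).flatMap (fun k => if 2 ≤ (grp k).length then [(k, grp k)] else []) with hpairs
  have hfst : (pairs.map (fun p => p.1)).Nodup := by
    rw [hpairs, pv_flatMap_guard_map_fst]
    exact (PySem.Set.nodup_ofList K).filter _
  have hfresh : ∀ a ∈ pairs, (PySem.Dict.empty : PySem.Dict String (List (List String))).contains a.1 = false := by
    intro a _
    exact PySem.Dict.contains_empty _
  have hins := PySem.Dict.items_foldl_insert_fresh pairs (fun p => p.1) (fun p => p.2)
    PySem.Dict.empty hfresh hfst
  rw [hins]
  simp [PySem.Dict.empty, PySem.Dict.items]
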